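-- pv_equiv track=rewrite | github.com/teoocolo/esercizi_python | Esercizio1.py | competizione_con_meno_giudici
-- ===== SOURCE A (Python) =====
-- def competizione_con_meno_giudici(tupla_competizioni):
--     min=10000
--     array=[]
--     for chef, piatto, punti, giudici in tupla_competizioni:
--         if(giudici==min):
--             tupla=(chef, piatto, punti, giudici)
--             array.append(tupla)
--         if(giudici<min):
--             array=[]
--             min=giudici
--             tupla=(chef, piatto, punti, giudici)
--             array.append(tupla)
--
--     return array
-- ===== SOURCE B (Python) =====
-- def competizione_con_meno_giudici(tupla_competizioni):
--     m = 10000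
--     for chef, piatto, punti, giudici in tupla_competizioni:
--         m = min(m, giudici)
--     return [(chef, piatto, punti, giudici)
--             for chef, piatto, punti, giudici in tupla_competizioni
--             if giudici == m]
-- ===== Notes on version B (the rewrite author's own statement) =====
-- stated objective: simpler
-- what changed: B replaces A's single running-min loop with array resets by two plain passes: find the minimum judge count (seeded with A's 10000 cap), then filter the tuples equal to it.
import Mathlib
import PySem

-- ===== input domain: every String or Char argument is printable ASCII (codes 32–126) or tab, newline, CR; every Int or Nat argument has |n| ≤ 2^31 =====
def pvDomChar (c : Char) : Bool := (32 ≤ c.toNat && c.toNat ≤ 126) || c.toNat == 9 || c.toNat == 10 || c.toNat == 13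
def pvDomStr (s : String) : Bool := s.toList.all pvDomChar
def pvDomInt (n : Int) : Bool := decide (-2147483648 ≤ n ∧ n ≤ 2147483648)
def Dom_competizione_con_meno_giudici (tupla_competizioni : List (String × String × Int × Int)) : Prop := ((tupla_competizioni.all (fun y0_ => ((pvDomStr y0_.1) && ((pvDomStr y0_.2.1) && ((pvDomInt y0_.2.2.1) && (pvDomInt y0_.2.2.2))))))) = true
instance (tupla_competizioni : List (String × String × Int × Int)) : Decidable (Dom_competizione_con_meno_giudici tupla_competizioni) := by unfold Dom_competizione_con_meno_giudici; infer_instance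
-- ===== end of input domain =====

-- B replaces A's single running-min loop with array resets by two plain passes
-- (find the minimum, seeded with A's 10000 cap, then filter); return value proved equal on all inputs.

-- ===== PORT A =====
-- A's loop: state is (min, array); on each tuple, append if giudici == min, then reset if giudici < min.
def pvLoopA : List (String × String × Int × Int) → Int → List (String × String × Int × Int) → List (String × String × Int × Int)
  | [], _, array => array
  | (chef, piatto, punti, giudici) :: rest, min, array =>
    let array1 := if giudici = min then array ++ [(chef, piatto, punti, giudici)] else array
    if giudici < min then pvLoopA rest giudici [(chef, piatto, punti, giudici)]
    else pvLoopA rest min array1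

def competizione_con_meno_giudici (tupla_competizioni : List (String × String × Int × Int)) : List (String × String × Int × Int) :=
  pvLoopA tupla_competizioni 10000 []

-- ===== PORT B =====
-- first pass: running minimum seeded with 10000
def pvMinB (tupla_competizioni : List (String × String × Int × Int)) : Int :=
  tupla_competizioni.foldl (fun m x => min m x.2.2.2) 10000

-- second pass: list comprehension keeping tuples whose giudici equals the minimum
def competizione_con_meno_giudici_alt (tupla_competizioni : List (String × String × Int × Int)) : List (String × String × Int × Int) :=
  tupla_competizioni.filter (fun x => x.2.2.2 == pvMinB tupla_competizioni)

-- ===== PRECONDITION & SPEC =====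
def Spec_competizione_con_meno_giudici (tupla_competizioni : List (String × String × Int × Int)) (out : List (String × String × Int × Int)) : Prop := out = competizione_con_meno_giudici_alt tupla_competizioni
instance (tupla_competizioni : List (String × String × Int × Int)) (out : List (String × String × Int × Int)) : Decidable (Spec_competizione_con_meno_giudici tupla_competizioni out) := by unfold Spec_competizione_con_meno_giudici; infer_instance

-- ===== CLAIM (what is proved, stated in full; the proofs are below) =====
def Claim_equal_competizione_con_meno_giudici : Prop := ∀ (tupla_competizioni : List (String × String × Int × Int)), Dom_competizione_con_meno_giudici tupla_competizioni → Spec_competizione_con_meno_giudici tupla_competizioni (competizione_con_meno_giudici tupla_competizioni)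

-- ===== LEMMAS AND PROOFS =====
def pvFm (l : List (String × String × Int × Int)) (m : Int) : Int :=
  l.foldl (fun m x => min m x.2.2.2) m

theorem pvFm_le (l : List (String × String × Int × Int)) (m : Int) : pvFm l m ≤ m := by
  induction l generalizing m with
  | nil => simp [pvFm]
  | cons x t ih =>
    have h := ih (min m x.2.2.2)
    simp only [pvFm, List.foldl_cons] at h ⊢
    exact le_trans h (min_le_left _ _)

theorem pvLoopA_eq (l : List (String × String × Int × Int)) (m : Int) (arr : List (String × String × Int × Int)) :
    pvLoopA l m arr = (if pvFm l m < m then [] else arr) ++ l.filter (fun x => x.2.2.2 == pvFm l m) := by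
  induction l generalizing m arr with
  | nil => simp [pvLoopA, pvFm]
  | cons x t ih =>
    obtain ⟨c, p, pt, g⟩ := x
    have hfm : pvFm ((c, p, pt, g) :: t) m = pvFm t (min m g) := by simp [pvFm]
    by_cases hlt : g < m
    · have hmin : min m g = g := min_eq_right (le_of_lt hlt)
      have hne : g ≠ m := ne_of_lt hlt
      simp only [pvLoopA, if_neg hne, if_pos hlt]
      rw [ih g [(c, p, pt, g)], hfm, hmin]
      have hle := pvFm_le t g
      rcases lt_or_eq_of_le hle with h | h
      · have h1 : pvFm t g < m := lt_trans h hlt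
        have h2 : ¬ (g = pvFm t g) := by omega
        simp [h1, h, h2]
      · have h1 : pvFm t g < m := by omega
        rw [h]
        simp only [List.filter_cons]
        simp
        intro hmg
        exact absurd hmg (by omega)
    · by_cases heq : g = m
      · subst heq
        simp only [pvLoopA, if_neg hlt, if_true]
        rw [ih g (arr ++ [(c, p, pt, g)]), hfm, min_self]
        have hle := pvFm_le t g
        rcases lt_or_eq_of_le hle with h | h
        · have h2 : ¬ (g = pvFm t g) := by omega
          simp [h, h2]
        · rw [h]
          simp
      · have hgt : m < g := by omega
        simp only [pvLoopA, if_neg heq, if_neg hlt]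
        rw [ih m arr, hfm, min_eq_left (le_of_lt hgt)]
        have h2 : ¬ (g = pvFm t m) := by
          have hle := pvFm_le t m
          omega
        simp [h2]

-- ===== VERDICT (by name: the statement is the Claim_ definition above) =====
theorem competizione_con_meno_giudici_spec : Claim_equal_competizione_con_meno_giudici := by
  intro l _
  unfold Spec_competizione_con_meno_giudici competizione_con_meno_giudici competizione_con_meno_giudici_alt
  rw [pvLoopA_eq]
  have : pvMinB l = pvFm l 10000 := rfl
  rw [this]
  split <;> simp
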